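-- pv_equiv track=rewrite | github.com/davidferra13/CFV-1 | scripts/bootstrap-anythingllm-chefflow.py | slugify
-- ===== SOURCE A (Python) =====
-- def slugify(value: str) -> str:
--     cleaned = []
--     previous_dash = False
--     for char in value.lower():
--         if char.isalnum():
--             cleaned.append(char)
--             previous_dash = False
--             continue
--         if previous_dash:
--             continue
--         cleaned.append("-")
--         previous_dash = True
--     return "".join(cleaned).strip("-")
-- ===== SOURCE B (Python) =====
-- def slugify(value: str) -> str:
--     dashed = "".join(c if c.isalnum() else "-" for c in value.lower())
--     return "-".join(piece for piece in dashed.split("-") if piece)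
-- ===== Notes on version B (the rewrite author's own statement) =====
-- stated objective: idiomatic
-- what changed: B is a staged pipeline - map every non-alphanumeric char of value.lower() to '-', split the result on '-', drop the empty pieces and join them with '-' - replacing A's single stateful pass with a previous_dash flag plus a final strip('-').
import Mathlib
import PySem

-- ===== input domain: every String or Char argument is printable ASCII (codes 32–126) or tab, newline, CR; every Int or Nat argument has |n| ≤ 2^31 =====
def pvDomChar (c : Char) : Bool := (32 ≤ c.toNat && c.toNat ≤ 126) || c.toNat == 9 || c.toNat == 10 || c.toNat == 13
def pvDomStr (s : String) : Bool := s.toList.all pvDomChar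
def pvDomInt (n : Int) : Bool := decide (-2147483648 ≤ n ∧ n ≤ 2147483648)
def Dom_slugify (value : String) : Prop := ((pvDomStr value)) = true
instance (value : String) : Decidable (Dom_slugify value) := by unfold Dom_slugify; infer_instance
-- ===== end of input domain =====

-- B replaces A's stateful dash-emitting pass (previous_dash flag + final strip('-')) by a staged
-- pipeline: map non-alnum chars to '-', split on '-', drop empty pieces, join with '-'; same cost, idiomatic.


-- ===== PORT A =====
-- single pass: append alnum chars, emit '-' for a non-alnum char unless the previous emit was a dash; strip('-') at the end
def slugify (value : String) : String :=
  let r := (PySem.Chars.lower value.toList).foldl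
    (fun (st : List Char × Bool) c =>
      if PySem.Chars.isalnum c then (st.1 ++ [c], false)
      else if st.2 then st
      else (st.1 ++ ['-'], true)) ([], false)
  PySem.Str.stripChars (String.ofList r.1) "-"

-- ===== PORT B =====
-- staged pipeline: map each non-alnum char to '-', split on '-', drop empty pieces, join with '-'
def slugify_alt (value : String) : String :=
  let dashed := (PySem.Chars.lower value.toList).map
    (fun c => if PySem.Chars.isalnum c then c else '-')
  let pieces := PySem.Chars.splitOn dashed ['-']          -- dashed.split("-")
  PySem.Str.join "-" ((pieces.filter (fun p => !p.isEmpty)).map String.ofList)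

-- ===== PRECONDITION & SPEC =====
def Spec_slugify (value : String) (out : String) : Prop := out = slugify_alt value
instance (value : String) (out : String) : Decidable (Spec_slugify value out) := by unfold Spec_slugify; infer_instance

-- ===== CLAIM (what is proved, stated in full; the proofs are below) =====
def Claim_equal_slugify : Prop := ∀ (value : String), Dom_slugify value → Spec_slugify value (slugify value)

-- ===== LEMMAS AND PROOFS =====

-- the character test both programs use
def pal (c : Char) : Bool := PySem.Chars.isalnum c

-- recursive form of A's loop body (argument = previous_dash flag)
def body : List Char → Bool → List Char
  | [], _ => []
  | c :: t, b =>
    if pal c then c :: body t false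
    else if b then body t b else '-' :: body t true

-- word list both proofs meet at: maximal alnum runs (argument = current run)
def pW : List Char → List Char → List (List Char)
  | [], cur => if cur.isEmpty then [] else [cur]
  | c :: t, cur =>
    if pal c then pW t (cur ++ [c])
    else if cur.isEmpty then pW t cur else cur :: pW t []

-- trailing dash A's loop leaves when the scan is inside a word (last char non-alnum ⇒ one dash)
def trailM : List Char → List Char
  | [] => []
  | [c] => if pal c then [] else ['-']
  | _ :: c :: t => trailM (c :: t)

-- trailing dash when the scan starts with previous_dash = true (needs an alnum char first)
def trailN (cs : List Char) : List Char := if cs.any pal then trailM cs else []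

-- simple recursive form of split-on-'-' with a current-piece accumulator
def msp (cur : List Char) : List Char → List (List Char)
  | [] => [cur]
  | c :: t => if c = '-' then cur :: msp [] t else msp (cur ++ [c]) t

lemma foldA (cs : List Char) (acc : List Char) (b : Bool) :
    (cs.foldl (fun (st : List Char × Bool) c =>
      if PySem.Chars.isalnum c then (st.1 ++ [c], false)
      else if st.2 then st
      else (st.1 ++ ['-'], true)) (acc, b)).1 = acc ++ body cs b := by
  induction cs generalizing acc b with
  | nil => simp [body]
  | cons c t ih =>
    simp only [List.foldl_cons]
    unfold body
    simp only [pal]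
    by_cases h : PySem.Chars.isalnum c
    · simp only [h, if_true]
      rw [ih (acc ++ [c]) false]
      simp
    · simp only [h, Bool.false_eq_true, if_false]
      cases b with
      | true =>
        simp only [if_true]
        exact ih acc true
      | false =>
        simp only [Bool.false_eq_true, if_false]
        rw [ih (acc ++ ['-']) true]
        simp

-- PySem's fuelled splitter, specialised to the one-char separator '-', is msp
lemma go_msp (l : List Char) : ∀ (fuel : Nat) (cur : List Char) (acc : List (List Char)), l.length < fuel →
    PySem.Chars.splitOn.go ['-'] fuel l cur acc = acc.reverse ++ msp cur.reverse l := by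
  induction l with
  | nil =>
    intro fuel cur acc h
    cases fuel with
    | zero => omega
    | succ f => simp [PySem.Chars.splitOn.go, msp]
  | cons c t ih =>
    intro fuel cur acc h
    cases fuel with
    | zero => simp at h
    | succ f =>
      by_cases hc : c = '-'
      · subst hc
        rw [show PySem.Chars.splitOn.go ['-'] (f+1) ('-' :: t) cur acc
            = PySem.Chars.splitOn.go ['-'] f t [] (cur.reverse :: acc) by
          simp [PySem.Chars.splitOn.go, List.isPrefixOf]]
        rw [ih f [] (cur.reverse :: acc) (by simpa using h)]
        simp [msp]
      · have hc' : ¬ ('-' = c) := fun he => hc he.symm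
        rw [show PySem.Chars.splitOn.go ['-'] (f+1) (c :: t) cur acc
            = PySem.Chars.splitOn.go ['-'] f t (c :: cur) acc by
          simp [PySem.Chars.splitOn.go, List.isPrefixOf, hc']]
        rw [ih f (c :: cur) acc (by simpa using h)]
        simp [msp, hc]

lemma splitOn_msp (cs : List Char) : PySem.Chars.splitOn cs ['-'] = msp [] cs := by
  unfold PySem.Chars.splitOn
  rw [go_msp cs (cs.length + 1) [] [] (by omega)]
  simp

-- splitting the dashed image of cs and dropping empty pieces is exactly the run list pW
lemma msp_pW (cs : List Char) : ∀ cur,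
    (msp cur (cs.map (fun c => if PySem.Chars.isalnum c then c else '-'))).filter
      (fun p => !p.isEmpty) = pW cs cur := by
  induction cs with
  | nil =>
    intro cur
    cases cur <;> simp [msp, pW]
  | cons c t ih =>
    intro cur
    by_cases h : PySem.Chars.isalnum c
    · have hcd : ¬ (c = '-') := by
        intro he; rw [he] at h; exact absurd h (by decide)
      simp only [List.map_cons, h, if_true]
      rw [show msp cur (c :: t.map (fun c => if PySem.Chars.isalnum c then c else '-'))
          = msp (cur ++ [c]) (t.map (fun c => if PySem.Chars.isalnum c then c else '-')) from by
        simp [msp, hcd]]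
      rw [ih (cur ++ [c])]
      simp [pW, pal, h]
    · simp only [List.map_cons, h, Bool.false_eq_true, if_false]
      rw [show msp cur ('-' :: t.map (fun c => if PySem.Chars.isalnum c then c else '-'))
          = cur :: msp [] (t.map (fun c => if PySem.Chars.isalnum c then c else '-')) from by
        simp [msp]]
      cases cur with
      | nil => simp [List.filter, ih [], pW, pal, h]
      | cons a u => simp [List.filter, ih [], pW, pal, h]

lemma foldB (cs : List Char) :
    (PySem.Chars.splitOn (cs.map (fun c => if PySem.Chars.isalnum c then c else '-')) ['-']).filter
      (fun p => !p.isEmpty) = pW cs [] := by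
  rw [splitOn_msp, msp_pW]

lemma pW_ne_nil (cs : List Char) (cur : List Char) (h : ¬ cur.isEmpty) : pW cs cur ≠ [] := by
  induction cs generalizing cur with
  | nil => simp [pW, h]
  | cons c t ih =>
    by_cases hp : pal c
    · simpa [pW, hp] using ih (cur ++ [c]) (by simp)
    · simp [pW, hp, h]

lemma pW_nil_iff (cs : List Char) : pW cs [] = [] ↔ cs.any pal = false := by
  induction cs with
  | nil => simp [pW]
  | cons c t ih =>
    by_cases hp : pal c
    · simp [pW, hp, pW_ne_nil t [c] (by simp)]
    · simpa [pW, hp] using ih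

lemma trailM_cons (c : Char) (t : List Char) (h : t ≠ []) : trailM (c :: t) = trailM t := by
  cases t with
  | nil => exact absurd rfl h
  | cons d u => rfl

lemma trailM_no_alnum (t : List Char) (h : t ≠ []) (ha : t.any pal = false) : trailM t = ['-'] := by
  induction t with
  | nil => exact absurd rfl h
  | cons c u ih =>
    simp only [List.any_cons, Bool.or_eq_false_iff] at ha
    cases u with
    | nil => simp [trailM, ha.1]
    | cons d v => rw [trailM_cons c _ (by simp)]; exact ih (by simp) ha.2

lemma trailM_cases : ∀ t : List Char, trailM t = [] ∨ trailM t = ['-']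
  | [] => Or.inl rfl
  | [c] => by unfold trailM; split <;> simp
  | a :: c :: t => by
    rw [trailM_cons a (c :: t) (by simp)]
    exact trailM_cases (c :: t)

lemma trailN_cases (t : List Char) : trailN t = [] ∨ trailN t = ['-'] := by
  unfold trailN
  split
  · exact trailM_cases t
  · exact Or.inl rfl

lemma join_cons (a : List Char) (l : List (List Char)) :
    PySem.Chars.join ['-'] (a :: l) = a ++ (if l = [] then [] else ['-'] ++ PySem.Chars.join ['-'] l) := by
  cases l with
  | nil => simp [PySem.Chars.join_singleton]
  | cons b t => simp [PySem.Chars.join_cons_cons]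

-- the core correspondence between A's dash-emitting pass and the run list
lemma body_pW (cs : List Char) :
    (body cs true = PySem.Chars.join ['-'] (pW cs []) ++ trailN cs) ∧
    (∀ cur, ¬ cur.isEmpty →
      cur ++ body cs false = PySem.Chars.join ['-'] (pW cs cur) ++ trailM cs) := by
  induction cs with
  | nil =>
    refine ⟨by simp [body, pW, trailN, PySem.Chars.join_nil], ?_⟩
    intro cur hc
    simp [body, pW, hc, trailM, PySem.Chars.join_singleton]
  | cons c t ih =>
    obtain ⟨ihN, ihM⟩ := ih
    constructor
    · -- flag true
      by_cases hp : pal c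
      · have := ihM [c] (by simp)
        simp only [body, hp, if_pos, pW]
        rw [show (c :: body t false) = [c] ++ body t false from rfl, this]
        have h1 : pW (c :: t) [] = pW t [c] := by simp [pW, hp]
        have h2 : trailN (c :: t) = trailM t := by
          cases t with
          | nil => simp [trailN, trailM, hp]
          | cons d u =>
            rw [trailN, trailM_cons c (d :: u) (by simp)]
            simp [List.any_cons, hp]
        rw [← h1, ← h2]; simp [pW, hp]
      · rw [show body (c :: t) true = body t true by simp [body, hp]]
        have h1 : pW (c :: t) [] = pW t [] := by simp [pW, hp]
        have h2 : trailN (c :: t) = trailN t := by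
          cases t with
          | nil => simp [trailN, hp]
          | cons d u =>
            have hpf : pal c = false := by simpa using hp
            rw [trailN, trailN, trailM_cons c (d :: u) (by simp)]
            simp [List.any_cons, hpf]
        rw [ihN, h1, h2]
    · -- inside a word
      intro cur hc
      by_cases hp : pal c
      · have := ihM (cur ++ [c]) (by simp)
        simp only [body, hp, if_pos, pW]
        rw [show cur ++ (c :: body t false) = (cur ++ [c]) ++ body t false by simp, this]
        have h2 : trailM (c :: t) = trailM t := by
          cases t with
          | nil => simp [trailM, hp]
          | cons d u => exact trailM_cons c (d :: u) (by simp)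
        rw [h2]
      · rw [show body (c :: t) false = '-' :: body t true by simp [body, hp]]
        have hpw : pW (c :: t) cur = cur :: pW t [] := by simp [pW, hp, hc]
        rw [hpw, join_cons]
        by_cases he : pW t [] = []
        · have hany : t.any pal = false := (pW_nil_iff t).1 he
          have hbt : body t true = [] := by
            rw [ihN, he, trailN, hany]; simp [PySem.Chars.join_nil]
          have htr : trailM (c :: t) = ['-'] := by
            cases t with
            | nil => simp [trailM, hp]
            | cons d u =>
              rw [trailM_cons c (d :: u) (by simp)]
              exact trailM_no_alnum _ (by simp) hany
          rw [hbt, he, htr]; simp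
        · have hany : t.any pal = true := by
            by_contra h
            exact he ((pW_nil_iff t).2 (by simpa using h))
          have ht : t ≠ [] := by rintro rfl; simp at hany
          have htr : trailM (c :: t) = trailM t := trailM_cons c t ht
          rw [ihN, htr, trailN, hany, if_pos rfl, if_neg he]
          simp

lemma join_head (ws : List (List Char))
    (hw : ∀ w ∈ ws, w ≠ [] ∧ ∀ x ∈ w, pal x = true) :
    ∀ c, (PySem.Chars.join ['-'] ws).head? = some c → pal c = true := by
  cases ws with
  | nil => simp [PySem.Chars.join_nil]
  | cons a l =>
    intro c hc
    obtain ⟨ha, hpa⟩ := hw a (by simp)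
    rw [join_cons, List.head?_append] at hc
    cases a with
    | nil => exact absurd rfl ha
    | cons x u =>
      simp only [List.head?_cons, Option.some_or, Option.some.injEq] at hc
      subst hc
      exact hpa x (by simp)

lemma join_last (ws : List (List Char))
    (hw : ∀ w ∈ ws, w ≠ [] ∧ ∀ x ∈ w, pal x = true) :
    ∀ c, (PySem.Chars.join ['-'] ws).getLast? = some c → pal c = true := by
  induction ws with
  | nil => simp [PySem.Chars.join_nil]
  | cons a l ih =>
    intro c hc
    rw [join_cons] at hc
    by_cases hl : l = []
    · subst hl
      simp at hc
      obtain ⟨ha, hpa⟩ := hw a (by simp)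
      exact hpa c (List.mem_of_getLast? hc)
    · rw [if_neg hl] at hc
      have hjoin : PySem.Chars.join ['-'] l ≠ [] := by
        cases l with
        | nil => exact absurd rfl hl
        | cons b m =>
          rw [join_cons]
          obtain ⟨hb, _⟩ := hw b (by simp)
          simp [hb]
      rw [List.getLast?_append_of_ne_nil a (show ['-'] ++ PySem.Chars.join ['-'] l ≠ [] by simp),
        List.getLast?_append_of_ne_nil ['-'] hjoin] at hc
      exact ih (fun w hwm => hw w (by simp [hwm])) c hc

lemma pW_words (cs : List Char) (cur : List Char) (hcur : ∀ x ∈ cur, pal x = true) :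
    ∀ w ∈ pW cs cur, w ≠ [] ∧ ∀ x ∈ w, pal x = true := by
  induction cs generalizing cur with
  | nil =>
    intro w hwm
    simp only [pW] at hwm
    split at hwm
    · simp at hwm
    · next hne =>
      simp at hwm; subst hwm
      exact ⟨by simpa using hne, hcur⟩
  | cons c t ih =>
    intro w hwm
    by_cases hp : pal c
    · refine ih (cur ++ [c]) ?_ w (by simpa [pW, hp] using hwm)
      intro x hx
      rcases List.mem_append.1 hx with h | h
      · exact hcur x h
      · simp at h; subst h; exact hp
    · by_cases hc : cur.isEmpty
      · exact ih cur hcur w (by simpa [pW, hp, hc] using hwm)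
      · simp only [pW, hp, Bool.false_eq_true, hc, if_false] at hwm
        simp at hwm
        rcases hwm with h | h
        · subst h; exact ⟨by simpa using hc, hcur⟩
        · exact ih [] (by simp) w h

lemma strip_fixed (J lead trail : List Char)
    (hl : lead = [] ∨ lead = ['-']) (ht : trail = [] ∨ trail = ['-'])
    (h1 : ∀ c, J.head? = some c → pal c = true)
    (h2 : ∀ c, J.getLast? = some c → pal c = true) :
    PySem.Chars.stripChars (lead ++ J ++ trail) ['-'] = J := by
  have pd : ∀ c : Char, pal c = true → ¬ (c = '-') := by
    intro c hc h
    subst h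
    exact absurd hc (by decide)
  cases J with
  | nil =>
    rcases hl with rfl | rfl <;> rcases ht with rfl | rfl <;> decide
  | cons x u =>
    have hx : ¬ (x = '-') := pd x (h1 x rfl)
    show (List.dropWhile (fun c => List.contains ['-'] c)
        (List.dropWhile (fun c => List.contains ['-'] c)
          (lead ++ (x :: u) ++ trail)).reverse).reverse = x :: u
    have hdrop : List.dropWhile (fun c => List.contains ['-'] c) (lead ++ (x :: u) ++ trail)
        = (x :: u) ++ trail := by
      rcases hl with rfl | rfl
      · simp [hx]
      · simp [hx]
    rw [hdrop, List.reverse_append]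
    have hrev : List.dropWhile (fun c => List.contains ['-'] c)
        (trail.reverse ++ (x :: u).reverse)
        = List.dropWhile (fun c => List.contains ['-'] c) (x :: u).reverse := by
      rcases ht with rfl | rfl
      · simp
      · simp
    rw [hrev]
    obtain ⟨c, v, hcv⟩ := List.exists_cons_of_ne_nil (show ((x :: u) : List Char).reverse ≠ [] by simp)
    have hc : ((x :: u) : List Char).getLast? = some c := by
      rw [← List.head?_reverse, hcv, List.head?_cons]
    have hcd : ¬ (c = '-') := pd c (h2 c hc)
    rw [hcv, List.dropWhile_cons, if_neg (by simp [hcd])]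
    rw [← hcv, List.reverse_reverse]

lemma strip_body (cs : List Char) :
    PySem.Chars.stripChars (body cs false) ['-'] = PySem.Chars.join ['-'] (pW cs []) := by
  have hw := pW_words cs [] (by simp)
  have h1 := join_head (pW cs []) hw
  have h2 := join_last (pW cs []) hw
  cases cs with
  | nil => simp [body, pW, PySem.Chars.join_nil]; decide
  | cons c t =>
    by_cases hp : pal c
    · have hM := (body_pW t).2 [c] (by simp)
      have hb : body (c :: t) false = [] ++ (PySem.Chars.join ['-'] (pW (c :: t) []) ++ trailM t) := by
        simp only [body, hp, if_pos, List.nil_append]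
        rw [show (c :: body t false) = [c] ++ body t false from rfl, hM]
        simp [pW, hp]
      rw [hb, ← List.append_assoc]
      exact strip_fixed _ _ _ (Or.inl rfl) (trailM_cases t) h1 h2
    · have hN := (body_pW t).1
      have hb : body (c :: t) false = ['-'] ++ (PySem.Chars.join ['-'] (pW (c :: t) []) ++ trailN t) := by
        rw [show body (c :: t) false = '-' :: body t true by simp [body, hp], hN]
        simp [pW, hp]
      rw [hb, ← List.append_assoc]
      exact strip_fixed _ _ _ (Or.inr rfl) (trailN_cases t) h1 h2

-- ===== VERDICT (by name: the statement is the Claim_ definition above) =====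
theorem slugify_spec : Claim_equal_slugify := by
  intro value _
  show Spec_slugify value (slugify value)
  unfold Spec_slugify
  simp only [slugify, slugify_alt]
  rw [foldA _ [] false, foldB]
  unfold PySem.Str.stripChars PySem.Str.join
  congr 1
  simp only [List.nil_append, List.map_map, String.toList_ofList]
  rw [show ("-" : String).toList = ['-'] from rfl]
  rw [show List.map (String.toList ∘ String.ofList) (pW (PySem.Chars.lower value.toList) [])
      = pW (PySem.Chars.lower value.toList) [] from by
    simp [Function.comp_def, String.toList_ofList]]
  exact strip_body (PySem.Chars.lower value.toList)
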